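-- pv_equiv track=rewrite | github.com/Apress/python-challenges | ch06_arrays/solutions/ex11_array_min_max_and_pos.py | find_max_pos
-- ===== SOURCE A (Python) =====
-- def find_max_pos(values, start, end):
--     if len(values) == 0:
--         raise ValueError("find_max_pos not supported for empty input")
--     if start < 0 or start > end or end > len(values):
--         raise ValueError("invalid range")
--
--     max_pos = start
--     for i in range(start + 1, end):
--         if values[i] > values[max_pos]:
--             max_pos = i
--
--     return max_pos
-- ===== SOURCE B (Python) =====
-- def find_max_pos(values, start, end):
--     if len(values) == 0:
--         raise ValueError("find_max_pos not supported for empty input")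
--     if start < 0 or start > end or end > len(values):
--         raise ValueError("invalid range")
--
--     def helper(lo, hi):
--         # position of the leftmost maximum in values[lo:hi]; lo if the range is empty/singleton
--         if hi - lo <= 1:
--             return lo
--         mid = (lo + hi) // 2
--         left = helper(lo, mid)
--         right = helper(mid, hi)
--         return right if values[right] > values[left] else left
--
--     return helper(start, end)
-- ===== Notes on version B (the rewrite author's own statement) =====
-- stated objective: alternative
-- what changed: The linear left-to-right scan with a running max position is replaced by a divide-and-conquer recursion that splits [start,end) at the midpoint and combines the two halves with a strict '>' that favours the left index, preserving the leftmost-max tie-break.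
import Mathlib
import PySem

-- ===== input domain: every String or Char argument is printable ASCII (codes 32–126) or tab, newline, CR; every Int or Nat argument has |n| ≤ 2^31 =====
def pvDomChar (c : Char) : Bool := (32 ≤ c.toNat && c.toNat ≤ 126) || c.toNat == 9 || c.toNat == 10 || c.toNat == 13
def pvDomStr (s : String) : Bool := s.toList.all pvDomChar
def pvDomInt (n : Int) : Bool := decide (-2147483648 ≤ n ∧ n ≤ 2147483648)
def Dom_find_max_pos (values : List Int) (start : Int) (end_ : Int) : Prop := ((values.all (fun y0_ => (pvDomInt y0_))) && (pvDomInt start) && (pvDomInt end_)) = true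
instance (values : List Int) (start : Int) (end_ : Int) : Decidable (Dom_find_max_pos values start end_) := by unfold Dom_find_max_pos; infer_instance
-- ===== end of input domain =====

-- B replaces A's linear scan by a midpoint divide-and-conquer over [start, end); same O(n) cost, alternative decomposition.

-- ===== PORT A =====
-- loop 'for i in range(start+1, end): if values[i] > values[max_pos]: max_pos = i'
def find_max_pos (values : List Int) (start : Int) (end_ : Int) : Int :=
  (PySem.List.pyRange (start + 1) end_ 1).foldl
    (fun max_pos i =>
      if PySem.List.pyGetD values i 0 > PySem.List.pyGetD values max_pos 0 then i else max_pos)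
    start

-- ===== PORT B =====
-- Source B's recursive helper(lo, hi); recursion measured by (hi - lo).toNat
def fmpHelper (values : List Int) (lo hi : Int) : Int :=
  if _h : hi - lo ≤ 1 then lo
  else
    let mid := PySem.Int.floordiv (lo + hi) 2
    let left := fmpHelper values lo mid
    let right := fmpHelper values mid hi
    if PySem.List.pyGetD values right 0 > PySem.List.pyGetD values left 0 then right else left
termination_by (hi - lo).toNat
decreasing_by
  · have hm : PySem.Int.floordiv (lo + hi) 2 = (lo + hi) / 2 :=
      PySem.Int.floordiv_eq_ediv_of_pos (by omega)
    simp only [hm]; omega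
  · have hm : PySem.Int.floordiv (lo + hi) 2 = (lo + hi) / 2 :=
      PySem.Int.floordiv_eq_ediv_of_pos (by omega)
    simp only [hm]; omega

def find_max_pos_alt (values : List Int) (start : Int) (end_ : Int) : Int :=
  fmpHelper values start end_

-- ===== PRECONDITION & SPEC =====
-- Pre_ excludes exactly the inputs on which A raises ValueError (empty list or invalid range).
def Pre_find_max_pos (values : List Int) (start : Int) (end_ : Int) : Prop :=
  values ≠ [] ∧ 0 ≤ start ∧ start ≤ end_ ∧ end_ ≤ (values.length : Int)
instance (values : List Int) (start : Int) (end_ : Int) : Decidable (Pre_find_max_pos values start end_) := by unfold Pre_find_max_pos; infer_instance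

def pvWitness_find_max_pos : List Int × Int × Int := ([1, 3, 2], 0, 3)

def Spec_find_max_pos (values : List Int) (start : Int) (end_ : Int) (out : Int) : Prop := out = find_max_pos_alt values start end_
instance (values : List Int) (start : Int) (end_ : Int) (out : Int) : Decidable (Spec_find_max_pos values start end_ out) := by unfold Spec_find_max_pos; infer_instance

-- ===== CLAIM (what is proved, stated in full; the proofs are below) =====
def Claim_equal_find_max_pos : Prop := ∀ (values : List Int) (start : Int) (end_ : Int), Dom_find_max_pos values start end_ → Pre_find_max_pos values start end_ → Spec_find_max_pos values start end_ (find_max_pos values start end_)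

-- ===== LEMMAS AND PROOFS =====

-- 'p is the position of the leftmost maximum of f over [lo, hi)'
def IsLM (f : Int → Int) (lo hi p : Int) : Prop :=
  lo ≤ p ∧ p < hi ∧ (∀ i, lo ≤ i → i < hi → f i ≤ f p) ∧ (∀ i, lo ≤ i → i < p → f i < f p)

theorem IsLM_unique (f : Int → Int) (lo hi p q : Int)
    (hp : IsLM f lo hi p) (hq : IsLM f lo hi q) : p = q := by
  obtain ⟨hp1, hp2, hp3, hp4⟩ := hp
  obtain ⟨hq1, hq2, hq3, hq4⟩ := hq
  rcases lt_trichotomy p q with h | h | h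
  · exact absurd (hp3 q hq1 hq2) (not_le.mpr (hq4 p hp1 h))
  · exact h
  · exact absurd (hq3 p hp1 hp2) (not_le.mpr (hp4 q hq1 h))

-- A's scan computes the leftmost maximum position over [lo, hi)
theorem scan_isLM (f : Int → Int) (lo : Int) :
    ∀ hi, lo < hi →
      IsLM f lo hi ((PySem.List.pyRange (lo + 1) hi 1).foldl
        (fun max_pos i => if f i > f max_pos then i else max_pos) lo) := by
  intro hi hlt
  have hge : lo + 1 ≤ hi := hlt
  clear hlt
  induction hi, hge using Int.le_induction with
  | base =>
    rw [PySem.List.pyRange_one_eq_nil (by omega)]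
    simp only [List.foldl_nil]
    refine ⟨le_refl lo, by omega, ?_, fun i h1 h2 => by omega⟩
    intro i h1 h2
    have : i = lo := by omega
    rw [this]
  | succ hi hge ih =>
    rw [PySem.List.pyRange_one_succ_right (by omega), List.foldl_append]
    obtain ⟨h1, h2, h3, h4⟩ := ih
    simp only [List.foldl_cons, List.foldl_nil]
    set p := (PySem.List.pyRange (lo + 1) hi 1).foldl
      (fun max_pos i => if f i > f max_pos then i else max_pos) lo with hp
    by_cases hc : f hi > f p
    · rw [if_pos hc]
      refine ⟨by omega, by omega, ?_, ?_⟩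
      · intro i hi1 hi2
        rcases eq_or_lt_of_le (by omega : i ≤ hi) with he | hl
        · exact le_of_eq (by rw [he])
        · exact le_of_lt (lt_of_le_of_lt (h3 i hi1 hl) hc)
      · intro i hi1 hi2
        exact lt_of_le_of_lt (h3 i hi1 hi2) hc
    · rw [if_neg hc]
      refine ⟨h1, by omega, ?_, h4⟩
      intro i hi1 hi2
      rcases eq_or_lt_of_le (by omega : i ≤ hi) with he | hl
      · subst he; exact le_of_not_gt hc
      · exact h3 i hi1 hl

-- B's divide-and-conquer computes the same leftmost maximum position
theorem fmpHelper_unfold (values : List Int) (lo hi : Int) (h : ¬ hi - lo ≤ 1) :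
    fmpHelper values lo hi =
      (if PySem.List.pyGetD values (fmpHelper values (PySem.Int.floordiv (lo + hi) 2) hi) 0 >
          PySem.List.pyGetD values (fmpHelper values lo (PySem.Int.floordiv (lo + hi) 2)) 0
       then fmpHelper values (PySem.Int.floordiv (lo + hi) 2) hi
       else fmpHelper values lo (PySem.Int.floordiv (lo + hi) 2)) := by
  rw [fmpHelper, dif_neg h]

theorem helper_isLM_aux (values : List Int) :
    ∀ n : Nat, ∀ lo hi : Int, (hi - lo).toNat ≤ n → lo < hi →
      IsLM (fun i => PySem.List.pyGetD values i 0) lo hi (fmpHelper values lo hi) := by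
  intro n
  induction n with
  | zero => intro lo hi hn hlt; omega
  | succ n ih =>
    intro lo hi hn hlt
    by_cases h : hi - lo ≤ 1
    · rw [fmpHelper, dif_pos h]
      refine ⟨le_refl lo, hlt, ?_, fun i h1 h2 => by omega⟩
      intro i h1 h2
      have : i = lo := by omega
      rw [this]
    · have hm : PySem.Int.floordiv (lo + hi) 2 = (lo + hi) / 2 :=
        PySem.Int.floordiv_eq_ediv_of_pos (by omega)
      have hb1 : lo < PySem.Int.floordiv (lo + hi) 2 := by omega
      have hb2 : PySem.Int.floordiv (lo + hi) 2 < hi := by omega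
      obtain ⟨l1, l2, l3, l4⟩ := ih lo (PySem.Int.floordiv (lo + hi) 2) (by omega) hb1
      obtain ⟨r1, r2, r3, r4⟩ := ih (PySem.Int.floordiv (lo + hi) 2) hi (by omega) hb2
      rw [fmpHelper_unfold values lo hi h]
      by_cases hc : PySem.List.pyGetD values (fmpHelper values (PySem.Int.floordiv (lo + hi) 2) hi) 0 >
          PySem.List.pyGetD values (fmpHelper values lo (PySem.Int.floordiv (lo + hi) 2)) 0
      · rw [if_pos hc]
        refine ⟨by omega, r2, ?_, ?_⟩
        · intro i hi1 hi2
          by_cases him : i < PySem.Int.floordiv (lo + hi) 2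
          · exact le_of_lt (lt_of_le_of_lt (l3 i hi1 him) hc)
          · exact r3 i (by omega) hi2
        · intro i hi1 hi2
          by_cases him : i < PySem.Int.floordiv (lo + hi) 2
          · exact lt_of_le_of_lt (l3 i hi1 him) hc
          · exact r4 i (by omega) hi2
      · rw [if_neg hc]
        refine ⟨l1, by omega, ?_, l4⟩
        intro i hi1 hi2
        by_cases him : i < PySem.Int.floordiv (lo + hi) 2
        · exact l3 i hi1 him
        · exact le_trans (r3 i (by omega) hi2) (le_of_not_gt hc)

theorem helper_isLM (values : List Int) (lo hi : Int) (hlt : lo < hi) :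
    IsLM (fun i => PySem.List.pyGetD values i 0) lo hi (fmpHelper values lo hi) :=
  helper_isLM_aux values (hi - lo).toNat lo hi (le_refl _) hlt

-- ===== VERDICT (by name: the statement is the Claim_ definition above) =====
theorem find_max_pos_spec : Claim_equal_find_max_pos := by
  intro values start end_ _ _
  unfold Spec_find_max_pos find_max_pos find_max_pos_alt
  by_cases hlt : start < end_
  · exact IsLM_unique (fun i => PySem.List.pyGetD values i 0) start end_ _ _
      (scan_isLM _ start end_ hlt) (helper_isLM values start end_ hlt)
  · rw [PySem.List.pyRange_one_eq_nil (by omega), List.foldl_nil,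
      fmpHelper, dif_pos (by omega)]
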